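-- pv_equiv track=rewrite | github.com/raeez/chiral-bar-cobar | compute/lib/convolution_sym_vs_tc_engine.py | deconcatenation_coproduct
-- ===== SOURCE A (Python) =====
-- from typing import Dict, List, Optional, Sequence, Tuple
--
-- def deconcatenation_coproduct(n: int) -> List[Tuple[Tuple[int, ...], Tuple[int, ...]]]:
--     r"""Deconcatenation (ordered, NOT cocommutative) coproduct on T^c_n.
--
--     Delta(a_1 ... a_n) = sum_{p=0}^{n} (a_1 ... a_p) tensor (a_{p+1} ... a_n)
--
--     This is the coproduct on the TENSOR coalgebra T^c(V).
--     It has n+1 terms (including empty tensor factors).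
--
--     Returns list of (left_indices, right_indices) pairs.
--     """
--     elements = list(range(n))
--     result = []
--     for p in range(n + 1):
--         left = tuple(elements[:p])
--         right = tuple(elements[p:])
--         result.append((left, right))
--     return result
-- ===== SOURCE B (Python) =====
-- def deconcatenation_coproduct(n):
--     """Incremental split: thread (left, right) through the loop instead of
--     slicing the full list at every split point."""
--     result = []
--     left = []
--     right = list(range(n))
--     for _ in range(n + 1):
--         result.append((tuple(left), tuple(right)))
--         if right:
--             left.append(right.pop(0))
--     return result
-- ===== Notes on version B (the rewrite author's own statement) =====
-- stated objective: alternative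
-- what changed: B threads an evolving (left, right) accumulator through the loop, moving one element from the front of right to the end of left per step, instead of re-slicing elements[:p] and elements[p:] at every split point.
import Mathlib
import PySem

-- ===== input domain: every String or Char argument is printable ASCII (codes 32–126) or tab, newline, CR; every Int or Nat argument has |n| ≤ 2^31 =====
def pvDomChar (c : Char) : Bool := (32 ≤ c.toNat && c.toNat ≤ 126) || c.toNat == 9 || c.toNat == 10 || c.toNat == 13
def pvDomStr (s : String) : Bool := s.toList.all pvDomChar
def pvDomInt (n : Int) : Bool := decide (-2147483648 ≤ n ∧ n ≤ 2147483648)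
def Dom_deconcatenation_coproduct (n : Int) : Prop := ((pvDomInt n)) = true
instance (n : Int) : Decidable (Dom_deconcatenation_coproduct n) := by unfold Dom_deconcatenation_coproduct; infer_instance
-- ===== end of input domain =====

-- B replaces A's per-split slicing by an evolving (left, right) accumulator (alternative decomposition, same cost).

-- ===== PORT A =====
-- A: elements = list(range(n)); for p in range(n+1): append (elements[:p], elements[p:])
def deconcatenation_coproduct (n : Int) : List (List Int × List Int) :=
  let elements := PySem.List.pyRange 0 n 1
  (PySem.List.pyRange 0 (n + 1) 1).foldl
    (fun result p =>
      result ++ [(PySem.List.slice elements none (some p),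
                  PySem.List.slice elements (some p) none)])
    []

-- ===== PORT B =====
-- B: result=[]; left=[]; right=list(range(n)); for _ in range(n+1): append (left,right); if right: move right[0] to left
def deconcatenation_coproduct_alt (n : Int) : List (List Int × List Int) :=
  let st := (PySem.List.pyRange 0 (n + 1) 1).foldl
    (fun (s : List (List Int × List Int) × List Int × List Int) _ =>
      let (result, left, right) := s
      let result := result ++ [(left, right)]
      match right with
      | h :: t => (result, left ++ [h], t)
      | [] => (result, left, right))
    ([], [], PySem.List.pyRange 0 n 1)
  st.1

-- ===== PRECONDITION & SPEC =====
def Spec_deconcatenation_coproduct (n : Int) (out : List (List Int × List Int)) : Prop := out = deconcatenation_coproduct_alt n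
instance (n : Int) (out : List (List Int × List Int)) : Decidable (Spec_deconcatenation_coproduct n out) := by unfold Spec_deconcatenation_coproduct; infer_instance

-- ===== CLAIM (what is proved, stated in full; the proofs are below) =====
def Claim_equal_deconcatenation_coproduct : Prop := ∀ (n : Int), Dom_deconcatenation_coproduct n → Spec_deconcatenation_coproduct n (deconcatenation_coproduct n)

-- ===== LEMMAS AND PROOFS =====

-- Invariant: starting B's loop at split point p with left = take p, right = drop p
-- produces the same appended pairs as A's slicing loop from p onwards.
theorem pv_loop_eq (elements : List Int) (n p : Int) (hp : 0 ≤ p)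
    (res : List (List Int × List Int)) :
    ((PySem.List.pyRange p (n + 1) 1).foldl
      (fun (s : List (List Int × List Int) × List Int × List Int) _ =>
        let (result, left, right) := s
        let result := result ++ [(left, right)]
        match right with
        | h :: t => (result, left ++ [h], t)
        | [] => (result, left, right))
      (res, elements.take p.toNat, elements.drop p.toNat)).1
    = (PySem.List.pyRange p (n + 1) 1).foldl
      (fun result q =>
        result ++ [(PySem.List.slice elements none (some q),
                    PySem.List.slice elements (some q) none)])
      res := by
  generalize hk : ((n + 1) - p).toNat = k
  induction k generalizing p res with
  | zero =>
    have hle : n + 1 ≤ p := by omega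
    rw [PySem.List.pyRange_one_eq_nil hle]
    simp
  | succ k ih =>
    have hlt : p < n + 1 := by omega
    rw [PySem.List.pyRange_one_cons hlt]
    simp only [List.foldl_cons]
    have hsl1 : PySem.List.slice elements none (some p) = elements.take p.toNat :=
      PySem.List.slice_to elements hp
    have hsl2 : PySem.List.slice elements (some p) none = elements.drop p.toNat :=
      PySem.List.slice_from elements hp
    have hp1 : (p + 1).toNat = p.toNat + 1 := by omega
    cases hdrop : elements.drop p.toNat with
    | nil =>
      have hlen : elements.length ≤ p.toNat := by
        have := List.drop_eq_nil_iff.mp hdrop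
        omega
      have htake : elements.take (p + 1).toNat = elements.take p.toNat := by
        rw [List.take_of_length_le hlen, List.take_of_length_le (by omega)]
      have hdrop1 : elements.drop (p + 1).toNat = [] := by
        apply List.drop_eq_nil_iff.mpr; omega
      have := ih (p + 1) (by omega)
        (res ++ [(PySem.List.slice elements none (some p),
                  PySem.List.slice elements (some p) none)]) (by omega)
      rw [← this, htake, hdrop1, hsl1, hsl2, hdrop]
    | cons h t =>
      have hget : elements[p.toNat]? = some h := by
        have : (elements.drop p.toNat)[0]? = some h := by rw [hdrop]; rfl
        simpa using this
      have htake : elements.take (p + 1).toNat = elements.take p.toNat ++ [h] := by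
        rw [hp1, List.take_add_one, hget]; rfl
      have hdrop1 : elements.drop (p + 1).toNat = t := by
        rw [hp1, ← List.drop_drop, hdrop]; rfl
      have := ih (p + 1) (by omega)
        (res ++ [(PySem.List.slice elements none (some p),
                  PySem.List.slice elements (some p) none)]) (by omega)
      rw [← this, htake, hdrop1, hsl1, hsl2, hdrop]

-- ===== VERDICT (by name: the statement is the Claim_ definition above) =====
theorem deconcatenation_coproduct_spec : Claim_equal_deconcatenation_coproduct := by
  intro n _
  unfold Spec_deconcatenation_coproduct deconcatenation_coproduct deconcatenation_coproduct_alt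
  have h := pv_loop_eq (PySem.List.pyRange 0 n 1) n 0 le_rfl []
  simpa using h.symm
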